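-- pv_equiv track=rewrite | github.com/juanvallaure1/TFGJuan | algoritmos_geneticos_para_la_composicion_musical.py | recompensa_repeticion
-- ===== SOURCE A (Python) =====
-- def recompensa_repeticion(lista_notas, escala, acordes, notas_por_acorde):
--
--
--
--     rec = 0
--     estribillo = lista_notas[0: (notas_por_acorde[0]+ notas_por_acorde[1])]
--     #REESCRIBIMOS LOS ACORDES SIMPLIFICADOS PARA BUSCARLOS EN EL RESTO DE LA LISTA DE ACORDES.
--     ac0 = set(sorted([nota%12 for nota in acordes[0]]))
--     ac1 = set(sorted([nota%12 for nota in acordes[1]]))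
--     for i in range(2, len(acordes)-1):
--         if set(sorted([nota%12 for nota in acordes[i]])) == ac0 and set(sorted([nota%12 for nota in acordes[i+1]])) == ac1:
--             #NOS CALCULAMOS LA POSICIÓN DE LA QUE TENEMOS QUE PARTIR DE LISTA_NOTAS
--             pos = sum(notas_por_acorde[:i])
--             final =pos + notas_por_acorde[i] + notas_por_acorde[i+1]
--             segundo_estribillo = lista_notas[pos:final]
--             for i in range(len(estribillo)):
--                 if estribillo[i] == segundo_estribillo[i]:
--                     rec += 1
--     return rec
-- ===== SOURCE B (Python) =====
-- def recompensa_repeticion(lista_notas, escala, acordes, notas_por_acorde):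
--     # Precompute each chord's mod-12 pitch-class set once and prefix sums of
--     # notas_por_acorde once, then a single scan; matched segments are compared with zip.
--     mods = [frozenset(n % 12 for n in ac) for ac in acordes]
--     pref = [0]
--     for n in notas_por_acorde:
--         pref.append(pref[-1] + n)
--     estribillo = lista_notas[:notas_por_acorde[0] + notas_por_acorde[1]]
--     rec = 0
--     for i in range(2, len(acordes) - 1):
--         if mods[i] == mods[0] and mods[i + 1] == mods[1]:
--             pos = pref[i]
--             seg = lista_notas[pos: pos + notas_por_acorde[i] + notas_por_acorde[i + 1]]
--             rec += sum(1 for x, y in zip(estribillo, seg) if x == y)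
--     return rec
-- ===== Notes on version B (the rewrite author's own statement) =====
-- stated objective: alternative
-- what changed: B precomputes each chord's mod-12 pitch-class set and the prefix sums of notas_por_acorde once, then does a single scan comparing matched segments with zip, instead of A's re-building sorted sets per iteration and re-summing notas_por_acorde[:i] per match.
import Mathlib
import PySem

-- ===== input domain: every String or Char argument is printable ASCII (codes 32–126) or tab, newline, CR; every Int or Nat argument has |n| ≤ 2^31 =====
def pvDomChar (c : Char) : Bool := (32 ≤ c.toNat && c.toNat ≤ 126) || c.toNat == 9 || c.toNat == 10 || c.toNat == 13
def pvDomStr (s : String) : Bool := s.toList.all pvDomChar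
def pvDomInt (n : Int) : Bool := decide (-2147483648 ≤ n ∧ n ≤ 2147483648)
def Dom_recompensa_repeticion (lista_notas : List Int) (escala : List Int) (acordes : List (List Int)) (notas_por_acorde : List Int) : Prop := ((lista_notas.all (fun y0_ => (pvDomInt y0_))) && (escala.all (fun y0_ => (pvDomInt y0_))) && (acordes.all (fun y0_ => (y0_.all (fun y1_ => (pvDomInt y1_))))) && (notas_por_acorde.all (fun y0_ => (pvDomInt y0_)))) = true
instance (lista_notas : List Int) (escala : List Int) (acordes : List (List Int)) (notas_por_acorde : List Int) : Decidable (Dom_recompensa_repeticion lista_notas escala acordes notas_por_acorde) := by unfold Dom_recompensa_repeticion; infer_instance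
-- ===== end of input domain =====

-- B precomputes the chords' mod-12 sets and prefix sums of notas_por_acorde once and compares
-- matched segments with zip (A rebuilds sorted sets each iteration and re-sums notas_por_acorde[:i]
-- per match): a structurally different single-scan formulation, objective = alternative.

-- ===== PORT A =====
-- set(sorted([nota % 12 for nota in ac]))
def pvModsA (ac : List Int) : PySem.Set Int :=
  PySem.Set.ofList (PySem.List.sorted (ac.map (fun nota => PySem.Int.mod nota 12)) (fun x => x) false)

def recompensa_repeticion (lista_notas : List Int) (escala : List Int) (acordes : List (List Int)) (notas_por_acorde : List Int) : Int :=
  let estribillo := PySem.List.slice lista_notas (some 0)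
    (some (PySem.List.pyGetD notas_por_acorde 0 0 + PySem.List.pyGetD notas_por_acorde 1 0))
  let ac0 := pvModsA (PySem.List.pyGetD acordes 0 [])
  let ac1 := pvModsA (PySem.List.pyGetD acordes 1 [])
  (PySem.List.pyRange 2 ((acordes.length : Int) - 1) 1).foldl (fun rec i =>
    if PySem.Set.equal (pvModsA (PySem.List.pyGetD acordes i [])) ac0
        && PySem.Set.equal (pvModsA (PySem.List.pyGetD acordes (i + 1) [])) ac1 then
      let pos := (PySem.List.slice notas_por_acorde none (some i)).sum
      let final := pos + PySem.List.pyGetD notas_por_acorde i 0 + PySem.List.pyGetD notas_por_acorde (i + 1) 0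
      let seg := PySem.List.slice lista_notas (some pos) (some final)
      -- estribillo[j] == segundo_estribillo[j]; on Pre_ both indices are in range
      (PySem.List.pyRange 0 ((estribillo.length : Int)) 1).foldl (fun r j =>
        if PySem.List.pyGet? estribillo j == PySem.List.pyGet? seg j then r + 1 else r) rec
    else rec) 0

-- ===== PORT B =====
-- frozenset(n % 12 for n in ac)
def pvModsB (ac : List Int) : PySem.Set Int :=
  PySem.Set.ofList (ac.map (fun n => PySem.Int.mod n 12))

-- pref = [0]; for n in notas_por_acorde: pref.append(pref[-1] + n)
def pvPref (notas_por_acorde : List Int) : List Int :=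
  notas_por_acorde.foldl (fun pref n => pref ++ [PySem.List.pyGetD pref (-1) 0 + n]) [0]

def recompensa_repeticion_alt (lista_notas : List Int) (escala : List Int) (acordes : List (List Int)) (notas_por_acorde : List Int) : Int :=
  let mods := acordes.map pvModsB
  let pref := pvPref notas_por_acorde
  let estribillo := PySem.List.slice lista_notas none
    (some (PySem.List.pyGetD notas_por_acorde 0 0 + PySem.List.pyGetD notas_por_acorde 1 0))
  (PySem.List.pyRange 2 ((acordes.length : Int) - 1) 1).foldl (fun rec i =>
    if PySem.Set.equal (PySem.List.pyGetD mods i PySem.Set.empty) (PySem.List.pyGetD mods 0 PySem.Set.empty)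
        && PySem.Set.equal (PySem.List.pyGetD mods (i + 1) PySem.Set.empty) (PySem.List.pyGetD mods 1 PySem.Set.empty) then
      let pos := PySem.List.pyGetD pref i 0
      let seg := PySem.List.slice lista_notas (some pos)
        (some (pos + PySem.List.pyGetD notas_por_acorde i 0 + PySem.List.pyGetD notas_por_acorde (i + 1) 0))
      rec + ((estribillo.zip seg).countP (fun p => p.1 == p.2) : Int)
    else rec) 0

-- ===== PRECONDITION & SPEC =====
-- Pre_ excludes exactly the inputs on which A raises IndexError: fewer than two chords or
-- note-counts, or a matched repetition whose notas_por_acorde entries are missing or whose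
-- window is shorter than the estribillo (the inner loop then indexes past segundo_estribillo).
def Pre_recompensa_repeticion (lista_notas : List Int) (escala : List Int) (acordes : List (List Int)) (notas_por_acorde : List Int) : Prop :=
  2 ≤ acordes.length ∧ 2 ≤ notas_por_acorde.length ∧
  ∀ i, i < acordes.length →
    (2 ≤ i ∧ i + 1 < acordes.length ∧
     PySem.Set.equal (pvModsB (acordes.getD i [])) (pvModsB (acordes.getD 0 [])) = true ∧
     PySem.Set.equal (pvModsB (acordes.getD (i + 1) [])) (pvModsB (acordes.getD 1 [])) = true) →
    i + 2 ≤ notas_por_acorde.length ∧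
    (PySem.List.slice lista_notas none (some (notas_por_acorde.getD 0 0 + notas_por_acorde.getD 1 0))).length ≤
      (PySem.List.slice lista_notas (some ((notas_por_acorde.take i).sum))
        (some ((notas_por_acorde.take i).sum + notas_por_acorde.getD i 0 + notas_por_acorde.getD (i + 1) 0))).length

instance (lista_notas : List Int) (escala : List Int) (acordes : List (List Int)) (notas_por_acorde : List Int) : Decidable (Pre_recompensa_repeticion lista_notas escala acordes notas_por_acorde) := by unfold Pre_recompensa_repeticion; infer_instance

def pvWitness_recompensa_repeticion : List Int × List Int × List (List Int) × List Int :=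
  ([60, 62], [], [[60], [62]], [1, 1])

def Spec_recompensa_repeticion (lista_notas : List Int) (escala : List Int) (acordes : List (List Int)) (notas_por_acorde : List Int) (out : Int) : Prop := out = recompensa_repeticion_alt lista_notas escala acordes notas_por_acorde
instance (lista_notas : List Int) (escala : List Int) (acordes : List (List Int)) (notas_por_acorde : List Int) (out : Int) : Decidable (Spec_recompensa_repeticion lista_notas escala acordes notas_por_acorde out) := by unfold Spec_recompensa_repeticion; infer_instance

-- ===== CLAIM (what is proved, stated in full; the proofs are below) =====
def Claim_equal_recompensa_repeticion : Prop := ∀ (lista_notas : List Int) (escala : List Int) (acordes : List (List Int)) (notas_por_acorde : List Int), Dom_recompensa_repeticion lista_notas escala acordes notas_por_acorde → Pre_recompensa_repeticion lista_notas escala acordes notas_por_acorde → Spec_recompensa_repeticion lista_notas escala acordes notas_por_acorde (recompensa_repeticion lista_notas escala acordes notas_por_acorde)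

-- ===== LEMMAS AND PROOFS =====

theorem pv_ms_equal (x y : List Int) :
    PySem.Set.equal (pvModsA x) (pvModsA y) = PySem.Set.equal (pvModsB x) (pvModsB y) := by
  rw [Bool.eq_iff_iff]
  simp [pvModsA, pvModsB, PySem.Set.equal_iff, PySem.Set.mem_ofList, PySem.List.mem_sorted]

theorem pv_pref_eq (npa : List Int) :
    pvPref npa = (List.range (npa.length + 1)).map (fun k => (npa.take k).sum) := by
  induction npa using List.reverseRecOn with
  | nil => simp [pvPref]
  | append_singleton xs x ih =>
    have hstep : pvPref (xs ++ [x]) =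
        pvPref xs ++ [PySem.List.pyGetD (pvPref xs) (-1) 0 + x] := by
      simp [pvPref, List.foldl_append]
    have hlast : PySem.List.pyGetD
        ((List.range (xs.length + 1)).map (fun k => (xs.take k).sum)) (-1) 0 = xs.sum := by
      rw [List.range_succ, List.map_append]
      simp [PySem.List.pyGetD_neg_one_append_singleton]
    have hR : (List.range ((xs ++ [x]).length + 1)).map (fun k => ((xs ++ [x]).take k).sum)
        = (List.range (xs.length + 1)).map (fun k => (xs.take k).sum) ++ [xs.sum + x] := by
      simp only [List.length_append, List.length_cons, List.length_nil]
      rw [show xs.length + (0 + 1) + 1 = (xs.length + 1) + 1 by omega, List.range_succ,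
        List.map_append]
      congr 1
      · apply List.map_congr_left
        intro k hk
        rw [List.mem_range] at hk
        rw [List.take_append_of_le_length (by omega)]
      · simp [List.take_of_length_le (by simp : (xs ++ [x]).length ≤ xs.length + 1)]
    rw [hstep, ih, hlast, hR]

theorem pv_foldl_id {α : Type} (l : List α) (rec : Int) :
    l.foldl (fun r (_ : α) => r) rec = rec := by
  induction l generalizing rec with
  | nil => rfl
  | cons x t ih => simp [ih rec]

theorem pv_inner_nat (e s : List Int) (rec : Int) :
    (List.range e.length).foldl (fun r k => if e[k]? == s[k]? then r + 1 else r) rec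
      = rec + ((e.zip s).countP (fun p => p.1 == p.2) : Int) := by
  induction e generalizing s rec with
  | nil => simp
  | cons a e' ih =>
    rw [List.length_cons, List.range_succ_eq_map, List.foldl_cons, List.foldl_map]
    cases s with
    | nil =>
      simp only [List.getElem?_nil, List.getElem?_cons_zero, List.getElem?_cons_succ]
      rw [if_neg (by simp)]
      have h2 : (List.range e'.length).foldl
          (fun (r : Int) (k : Nat) => if (e'[k]? == (none : Option Int)) then r + 1 else r) rec
          = (List.range e'.length).foldl (fun r (_ : Nat) => r) rec := by
        apply PySem.List.foldl_congr_mem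
        intro acc k hk
        rw [List.mem_range] at hk
        rw [List.getElem?_eq_getElem hk]
        simp
      refine h2.trans ?_
      rw [pv_foldl_id]
      simp
    | cons b s' =>
      simp only [List.getElem?_cons_zero, List.getElem?_cons_succ]
      by_cases h : a = b
      · rw [if_pos (by simp [h])]
        refine (ih s' (rec + 1)).trans ?_
        simp [List.zip_cons_cons, h]
        ring
      · rw [if_neg (by simp [h])]
        refine (ih s' rec).trans ?_
        simp [List.zip_cons_cons, h]

theorem pv_inner_count (e s : List Int) (rec : Int) :
    (PySem.List.pyRange 0 ((e.length : Int)) 1).foldl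
      (fun r j => if PySem.List.pyGet? e j == PySem.List.pyGet? s j then r + 1 else r) rec
    = rec + ((e.zip s).countP (fun p => p.1 == p.2) : Int) := by
  rw [PySem.List.pyRange_zero_nat, List.foldl_map]
  rw [← pv_inner_nat e s rec]
  apply PySem.List.foldl_congr_mem
  intro acc k _
  simp [PySem.List.pyGet?_natCast]

theorem pv_getD_int {α : Type} (xs : List α) (i : Int) (d : α) (h0 : 0 ≤ i)
    (hn : i < (xs.length : Int)) : PySem.List.pyGetD xs i d = xs.getD i.toNat d := by
  rw [PySem.List.pyGetD_eq_getElem xs d h0 hn, List.getD_eq_getElem xs d (by omega)]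

theorem pv_mods_get (acordes : List (List Int)) (i : Int) (h0 : 0 ≤ i)
    (hn : i < (acordes.length : Int)) :
    PySem.List.pyGetD (acordes.map pvModsB) i PySem.Set.empty = pvModsB (acordes.getD i.toNat []) := by
  rw [pv_getD_int _ i _ h0 (by simpa using hn)]
  rw [List.getD_eq_getElem _ _ (by simp; omega), List.getElem_map,
    List.getD_eq_getElem _ _ (by omega)]

theorem pv_pref_get (npa : List Int) (n : Nat) (hn : n ≤ npa.length) :
    PySem.List.pyGetD (pvPref npa) ((n : Int)) 0 = (npa.take n).sum := by
  rw [pv_getD_int _ _ _ (by omega) (by rw [pv_pref_eq]; simp; omega), pv_pref_eq]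
  rw [Int.toNat_natCast, List.getD_eq_getElem _ _ (by simp; omega), List.getElem_map,
    List.getElem_range]

-- ===== VERDICT (by name: the statement is the Claim_ definition above) =====
theorem recompensa_repeticion_spec : Claim_equal_recompensa_repeticion := by
  intro lista_notas escala acordes notas_por_acorde hDom hPre
  obtain ⟨hA2, hN2, hPre3⟩ := hPre
  unfold Spec_recompensa_repeticion
  simp only [recompensa_repeticion, recompensa_repeticion_alt, PySem.List.slice_zero_start]
  apply PySem.List.foldl_congr_mem
  intro rec i hi
  rw [PySem.List.mem_pyRange_one] at hi
  obtain ⟨hi2, hiu⟩ := hi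
  lift i to ℕ using (by omega) with n
  have hn2 : 2 ≤ n := by exact_mod_cast hi2
  have hnu : n + 1 < acordes.length := by
    have : (n : Int) < (acordes.length : Int) - 1 := hiu
    omega
  have hcA1 := pv_getD_int acordes (n : Int) [] (by omega) (by exact_mod_cast (by omega : (n:Int) < (acordes.length : Int)))
  have hcA2 := pv_getD_int acordes ((n : Int) + 1) [] (by omega) (by omega)
  have hcA0 := pv_getD_int acordes 0 ([] : List Int) (by omega) (by exact_mod_cast (by omega : (0:Int) < (acordes.length : Int)))
  have hcAone := pv_getD_int acordes 1 ([] : List Int) (by omega) (by exact_mod_cast (by omega : (1:Int) < (acordes.length : Int)))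
  have hcB1 := pv_mods_get acordes (n : Int) (by omega) (by exact_mod_cast (by omega : (n:Int) < (acordes.length : Int)))
  have hcB2 := pv_mods_get acordes ((n : Int) + 1) (by omega) (by omega)
  have hcB0 := pv_mods_get acordes 0 (by omega) (by exact_mod_cast (by omega : (0:Int) < (acordes.length : Int)))
  have hcBone := pv_mods_get acordes 1 (by omega) (by exact_mod_cast (by omega : (1:Int) < (acordes.length : Int)))
  have htn : ((n : Int)).toNat = n := Int.toNat_natCast n
  have htn1 : ((n : Int) + 1).toNat = n + 1 := by omega
  have ht0 : ((0 : Int)).toNat = 0 := rfl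
  have ht1 : ((1 : Int)).toNat = 1 := rfl
  rw [hcA1, hcA2, hcA0, hcAone, hcB1, hcB2, hcB0, hcBone, pv_ms_equal, pv_ms_equal,
    htn, htn1, ht0, ht1]
  by_cases hc : (PySem.Set.equal (pvModsB (acordes.getD n [])) (pvModsB (acordes.getD 0 []))
      && PySem.Set.equal (pvModsB (acordes.getD (n + 1) [])) (pvModsB (acordes.getD 1 []))) = true
  · obtain ⟨hc1, hc2⟩ := Bool.and_eq_true_iff.mp hc
    obtain ⟨hlen, _⟩ := hPre3 n (by omega) ⟨hn2, hnu, hc1, hc2⟩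
    rw [if_pos hc, if_pos hc]
    have hpos : (PySem.List.slice notas_por_acorde none (some ((n : Int)))).sum
        = PySem.List.pyGetD (pvPref notas_por_acorde) ((n : Int)) 0 := by
      rw [PySem.List.slice_to_natCast, pv_pref_get _ _ (by omega)]
    rw [← hpos]
    rw [pv_inner_count]
  · rw [if_neg hc, if_neg hc]
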